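-- pv_equiv track=rewrite | github.com/MrBrantCode/unitest_baseline | mut_generate/mist_train_taco/taco_9605/solution.py | count_special_numbers
-- ===== SOURCE A (Python) =====
-- def count_special_numbers(N):
--     n = str(N)
--     x = len(n)
--     no = list(map(int, n))
--     temp = [0] * x
--
--     if x > 2:
--         sum = 99
--         for i in range(3, x):
--             sum = sum + 90
--         sum = sum + 10 * (int(n[0]) - 1)
--         sum = sum + int(n[1])
--         f = int(n[0]) % 10
--         s = int(n[1]) % 10
--         cd = s - f
--         temp[0] = n[0]
--         temp[1] = n[1]
--         for i in range(2, x):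
--             nxt = (s + cd) % 10
--             temp[i] = chr(nxt + 48)
--             s = nxt
--         temp = list(map(int, temp))
--         if temp <= no:
--             sum = sum + 1
--         return sum
--     else:
--         return int(n)
-- ===== SOURCE B (Python) =====
-- def count_special_numbers(N):
--     if N < 100:
--         return N
--     x = 2
--     p = 100
--     while p <= N:
--         x += 1
--         p *= 10
--     count = 99
--     for L in range(3, x + 1):
--         for f in range(1, 10):
--             for g in range(0, 10):
--                 val = f * 10 + g
--                 d = g
--                 for _ in range(L - 2):
--                     d = (d + g - f) % 10
--                     val = val * 10 + d
--                 if val <= N: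
--                     count += 1
--     return count
-- ===== Notes on version B (the rewrite author's own statement) =====
-- stated objective: alternative
-- what changed: Replaces A's string-based closed-form digit arithmetic by a purely numeric enumeration: B computes the digit count with a multiplying loop and then, for every length L in 3..x and every leading digit pair (f,g), builds the unique arithmetic-mod-10 candidate numerically and counts those <= N.
import Mathlib
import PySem

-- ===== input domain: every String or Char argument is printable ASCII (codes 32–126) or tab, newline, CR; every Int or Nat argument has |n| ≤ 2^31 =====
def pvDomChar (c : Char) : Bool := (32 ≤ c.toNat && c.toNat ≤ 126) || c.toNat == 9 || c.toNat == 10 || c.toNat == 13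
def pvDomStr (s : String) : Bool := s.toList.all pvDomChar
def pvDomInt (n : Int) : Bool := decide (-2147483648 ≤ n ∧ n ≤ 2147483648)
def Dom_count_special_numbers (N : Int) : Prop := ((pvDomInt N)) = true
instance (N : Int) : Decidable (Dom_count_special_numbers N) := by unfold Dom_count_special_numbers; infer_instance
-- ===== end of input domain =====

-- B replaces A's string-based closed-form digit arithmetic by a purely numeric enumeration of the
-- arithmetic-mod-10 candidates of every length (objective: alternative algorithm, similar cost).

-- ===== PORT A =====
-- int(c) for a single character c (Python raises on non-digits; such inputs are outside Pre_)
def pyIntOfChar (c : Char) : Int := (PySem.Int.ofChars? [c]).getD 0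

-- Python list comparison 'temp <= no' on lists of ints (lexicographic with prefix rule)
def pyListLe : List Int → List Int → Bool
  | [], _ => true
  | _ :: _, [] => false
  | a :: as, b :: bs => if a < b then true else if b < a then false else pyListLe as bs

-- body of A's filling loop: nxt = (s + cd) % 10; temp[i] = chr(nxt + 48); s = nxt
def aStep (cd : Int) (st : Int × List Char) : Int × List Char :=
  let nxt := PySem.Int.mod (st.1 + cd) 10
  (nxt, st.2 ++ [Char.ofNat (nxt + 48).toNat])

def count_special_numbers (N : Int) : Int :=
  let n : List Char := PySem.Int.toChars N
  let x : Nat := n.length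
  let no : List Int := n.map pyIntOfChar
  if 2 < x then
    let sum : Int := (PySem.List.pyRange 3 (x : Int) 1).foldl (fun a _ => a + 90) 99
    let n0 : Char := (PySem.List.pyGet? n 0).getD ' '
    let n1 : Char := (PySem.List.pyGet? n 1).getD ' '
    let sum : Int := sum + 10 * (pyIntOfChar n0 - 1)
    let sum : Int := sum + pyIntOfChar n1
    let f : Int := PySem.Int.mod (pyIntOfChar n0) 10
    let s : Int := PySem.Int.mod (pyIntOfChar n1) 10
    let cd : Int := s - f
    let fill := (PySem.List.pyRange 2 (x : Int) 1).foldl (fun st _ => aStep cd st) (s, [])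
    let temp : List Char := n0 :: n1 :: fill.2
    let tempI : List Int := temp.map pyIntOfChar
    if pyListLe tempI no then sum + 1 else sum
  else
    (PySem.Int.ofChars? n).getD 0

-- ===== PORT B =====
-- the digit-count loop: x = 2; p = 100; while p <= N: x += 1; p *= 10
def bDigLen (N x p : Int) (hp : 0 < p) : Int :=
  if p ≤ N then bDigLen N (x + 1) (p * 10) (by omega) else x
termination_by (N + 1 - p).toNat
decreasing_by omega

-- body of B's innermost loop: d = (d + g - f) % 10; val = val * 10 + d
def bStep (f g : Int) (st : Int × Int) : Int × Int :=
  let nd := PySem.Int.mod (st.1 + g - f) 10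
  (nd, st.2 * 10 + nd)

-- the candidate value built for length L from leading pair (f, g)
def bCand (L f g : Int) : Int :=
  ((PySem.List.pyRange 0 (L - 2) 1).foldl (fun st _ => bStep f g st) (g, f * 10 + g)).2

def count_special_numbers_alt (N : Int) : Int :=
  if N < 100 then N
  else
    let x : Int := bDigLen N 2 100 (by omega)
    (PySem.List.pyRange 3 (x + 1) 1).foldl (fun cnt L =>
      (PySem.List.pyRange 1 10 1).foldl (fun cnt f =>
        (PySem.List.pyRange 0 10 1).foldl (fun cnt g =>
          if bCand L f g ≤ N then cnt + 1 else cnt) cnt) cnt) 99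

-- ===== PRECONDITION & SPEC =====
-- Pre_ excludes exactly the negative N: there str(N) starts with '-' and A's map(int, n) raises ValueError.
def Pre_count_special_numbers (N : Int) : Prop := 0 ≤ N
instance (N : Int) : Decidable (Pre_count_special_numbers N) := by unfold Pre_count_special_numbers; infer_instance
def pvWitness_count_special_numbers : Int := 12345

def Spec_count_special_numbers (N : Int) (out : Int) : Prop := out = count_special_numbers_alt N
instance (N : Int) (out : Int) : Decidable (Spec_count_special_numbers N out) := by unfold Spec_count_special_numbers; infer_instance

-- ===== CLAIM (what is proved, stated in full; the proofs are below) =====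
def Claim_equal_count_special_numbers : Prop := ∀ (N : Int), Dom_count_special_numbers N → Pre_count_special_numbers N → Spec_count_special_numbers N (count_special_numbers N)


-- ===== LEMMAS AND PROOFS =====

-- value of a big-endian digit list
def bvI (l : List Int) : Int := l.foldl (fun a d => 10 * a + d) 0

theorem bvI_from (l : List Int) (a : Int) :
    l.foldl (fun acc d => 10 * acc + d) a = a * 10 ^ l.length + bvI l := by
  induction l generalizing a with
  | nil => simp [bvI]
  | cons d t ih =>
    simp only [List.foldl_cons, List.length_cons, bvI]
    rw [ih (10 * a + d), ih (10 * 0 + d)]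
    ring

theorem bvI_cons (d : Int) (t : List Int) : bvI (d :: t) = d * 10 ^ t.length + bvI t := by
  conv_lhs => simp only [bvI, List.foldl_cons]
  rw [show (10 * 0 + d : Int) = d by ring, bvI_from t d]

theorem bvI_append (l1 l2 : List Int) : bvI (l1 ++ l2) = bvI l1 * 10 ^ l2.length + bvI l2 := by
  simp only [bvI, List.foldl_append]
  exact bvI_from l2 _

theorem bvI_bounds (l : List Int) (h : ∀ d ∈ l, 0 ≤ d ∧ d < 10) :
    0 ≤ bvI l ∧ bvI l < 10 ^ l.length := by
  induction l with
  | nil => simp [bvI]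
  | cons d t ih =>
    have hd := h d (List.mem_cons_self ..)
    have ht := ih (fun e he => h e (List.mem_cons_of_mem _ he))
    have hp : (0:Int) < 10 ^ t.length := by positivity
    rw [bvI_cons]
    constructor
    · nlinarith [hd.1, ht.1]
    · simp only [List.length_cons, pow_succ]
      nlinarith [hd.2, ht.2]

theorem pyListLe_iff (l1 : List Int) : ∀ (l2 : List Int), l1.length = l2.length →
    (∀ d ∈ l1, 0 ≤ d ∧ d < 10) → (∀ d ∈ l2, 0 ≤ d ∧ d < 10) →
    (pyListLe l1 l2 = true ↔ bvI l1 ≤ bvI l2) := by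
  induction l1 with
  | nil =>
    intro l2 hlen _ _
    have : l2 = [] := by cases l2 <;> simp_all
    subst this; simp [pyListLe]
  | cons a t1 ih =>
    intro l2 hlen h1 h2
    cases l2 with
    | nil => simp at hlen
    | cons b t2 =>
      have hlen' : t1.length = t2.length := by simpa using hlen
      have ha := h1 a (List.mem_cons_self ..)
      have hb := h2 b (List.mem_cons_self ..)
      have ht1 := bvI_bounds t1 (fun d hd => h1 d (List.mem_cons_of_mem _ hd))
      have ht2 := bvI_bounds t2 (fun d hd => h2 d (List.mem_cons_of_mem _ hd))
      have hp : (0:Int) < 10 ^ t2.length := by positivity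
      rw [hlen'] at ht1
      rw [bvI_cons, bvI_cons, hlen']
      simp only [pyListLe]
      split_ifs with hab hba
      · simp only [true_iff]
        nlinarith [ht1.2, ht2.1, mul_le_mul_of_nonneg_right (by omega : a + 1 ≤ b) (le_of_lt hp)]
      · simp only [false_iff, not_le]
        nlinarith [ht1.1, ht2.2, mul_le_mul_of_nonneg_right (by omega : b + 1 ≤ a) (le_of_lt hp)]
      · have hae : a = b := by omega
        subst hae
        rw [ih t2 hlen' (fun d hd => h1 d (List.mem_cons_of_mem _ hd))
            (fun d hd => h2 d (List.mem_cons_of_mem _ hd))]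
        exact (add_le_add_iff_left _).symm

-- the shared digit recurrence: d0 = g, d_{k+1} = (d_k + g - f) % 10
def dseq (f g : Int) : Nat → Int
  | 0 => g
  | k + 1 => PySem.Int.mod (dseq f g k + g - f) 10

theorem dseq_bounds (f g : Int) (hg : 0 ≤ g ∧ g < 10) :
    ∀ k, 0 ≤ dseq f g k ∧ dseq f g k < 10
  | 0 => hg
  | k + 1 => ⟨PySem.Int.mod_nonneg _ (by norm_num), PySem.Int.mod_lt _ (by norm_num)⟩

-- A's filling loop, characterized against dseq
theorem aFold (f g : Int) {α : Type} : ∀ (l : List α) (k : Nat) (cs : List Char),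
    l.foldl (fun st _ => aStep (g - f) st) (dseq f g k, cs)
      = (dseq f g (k + l.length),
         cs ++ (List.range l.length).map (fun i => Char.ofNat (dseq f g (k + i + 1) + 48).toNat)) := by
  intro l
  induction l with
  | nil => intro k cs; simp
  | cons e t ih =>
    intro k cs
    have hstep : aStep (g - f) (dseq f g k, cs)
        = (dseq f g (k + 1), cs ++ [Char.ofNat (dseq f g (k + 1) + 48).toNat]) := by
      simp only [aStep, dseq]
      rw [show dseq f g k + (g - f) = dseq f g k + g - f by ring]
    rw [List.foldl_cons, hstep, ih (k + 1)]
    have htail : (List.range (e :: t).length).map (fun i => Char.ofNat (dseq f g (k + i + 1) + 48).toNat)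
        = Char.ofNat (dseq f g (k + 1) + 48).toNat ::
          (List.range t.length).map (fun i => Char.ofNat (dseq f g (k + 1 + i + 1) + 48).toNat) := by
      simp only [List.length_cons, List.range_succ_eq_map, List.map_cons, List.map_map]
      congr 1
      apply List.map_congr_left
      intro i _
      simp only [Function.comp_apply]
      have hix : k + (i + 1) + 1 = k + 1 + i + 1 := by omega
      rw [hix]
    refine Prod.ext ?_ ?_
    · show dseq f g (k + 1 + t.length) = dseq f g (k + (e :: t).length)
      congr 1
      simp only [List.length_cons]
      omega
    · show cs ++ [Char.ofNat (dseq f g (k + 1) + 48).toNat] ++ _ = _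
      rw [htail]
      simp

-- B's innermost loop: exact value, against dseq
theorem bFoldEq (f g : Int) {α : Type} : ∀ (l : List α) (k : Nat) (v : Int),
    l.foldl (fun st _ => bStep f g st) (dseq f g k, v)
      = (dseq f g (k + l.length),
         v * 10 ^ l.length + bvI ((List.range l.length).map (fun i => dseq f g (k + i + 1)))) := by
  intro l
  induction l with
  | nil => intro k cs; simp [bvI]
  | cons e t ih =>
    intro k v
    have hstep : bStep f g (dseq f g k, v) = (dseq f g (k + 1), v * 10 + dseq f g (k + 1)) := rfl
    rw [List.foldl_cons, hstep, ih (k + 1)]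
    have htail : (List.range (e :: t).length).map (fun i => dseq f g (k + i + 1))
        = dseq f g (k + 1) :: (List.range t.length).map (fun i => dseq f g (k + 1 + i + 1)) := by
      simp only [List.length_cons, List.range_succ_eq_map, List.map_cons, List.map_map]
      congr 1
      apply List.map_congr_left
      intro i _
      simp only [Function.comp_apply]
      have hix : k + (i + 1) + 1 = k + 1 + i + 1 := by omega
      rw [hix]
    refine Prod.ext ?_ ?_
    · show dseq f g (k + 1 + t.length) = dseq f g (k + (e :: t).length)
      congr 1
      simp only [List.length_cons]
      omega
    · show (v * 10 + dseq f g (k + 1)) * 10 ^ t.length + _ = _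
      rw [htail, bvI_cons]
      simp only [List.length_cons, List.length_map, List.length_range]
      ring

-- B's innermost loop: bounds, for arbitrary leading pair
theorem bFoldBound (f g : Int) {α : Type} : ∀ (l : List α) (d v : Int), 0 ≤ d → d < 10 →
    ∃ d' r, l.foldl (fun st _ => bStep f g st) (d, v) = (d', v * 10 ^ l.length + r) ∧
      0 ≤ d' ∧ d' < 10 ∧ 0 ≤ r ∧ r < 10 ^ l.length := by
  intro l
  induction l with
  | nil => intro d v h0 h1; exact ⟨d, 0, by simp, h0, h1, le_refl _, by norm_num⟩
  | cons e t ih =>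
    intro d v h0 h1
    have hnd0 : 0 ≤ PySem.Int.mod (d + g - f) 10 := PySem.Int.mod_nonneg _ (by norm_num)
    have hnd1 : PySem.Int.mod (d + g - f) 10 < 10 := PySem.Int.mod_lt _ (by norm_num)
    obtain ⟨d', r, heq, hd0, hd1, hr0, hr1⟩ :=
      ih (PySem.Int.mod (d + g - f) 10) (v * 10 + PySem.Int.mod (d + g - f) 10) hnd0 hnd1
    have hp : (0:Int) < 10 ^ t.length := by positivity
    refine ⟨d', PySem.Int.mod (d + g - f) 10 * 10 ^ t.length + r, ?_, hd0, hd1, by positivity, ?_⟩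
    · rw [List.foldl_cons,
        show bStep f g (d, v) = (PySem.Int.mod (d + g - f) 10, v * 10 + PySem.Int.mod (d + g - f) 10) from rfl,
        heq]
      refine Prod.ext rfl ?_
      simp only [List.length_cons, pow_succ]
      ring
    · simp only [List.length_cons, pow_succ]
      nlinarith

theorem bCand_eq_fold (L f g : Int) :
    bCand L f g = ((PySem.List.pyRange 0 (L - 2) 1).foldl (fun st _ => bStep f g st) (dseq f g 0, f * 10 + g)).2 := rfl

theorem bCand_bound (L f g : Int) (hg0 : 0 ≤ g) (hg1 : g < 10) :
    (f * 10 + g) * 10 ^ (L - 2).toNat ≤ bCand L f g ∧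
      bCand L f g < (f * 10 + g + 1) * 10 ^ (L - 2).toNat := by
  obtain ⟨d', r, heq, _, _, hr0, hr1⟩ :=
    bFoldBound f g (PySem.List.pyRange 0 (L - 2) 1) g (f * 10 + g) hg0 hg1
  have hlen : (PySem.List.pyRange 0 (L - 2) 1).length = (L - 2).toNat := by
    rw [PySem.List.length_pyRange_one]; congr 1; ring
  rw [hlen] at heq hr1
  unfold bCand
  rw [heq]
  constructor <;> nlinarith [hr0, hr1]

theorem bCand_exact (L f g : Int) :
    bCand L f g = (f * 10 + g) * 10 ^ (L - 2).toNat +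
      bvI ((List.range (L - 2).toNat).map (fun i => dseq f g (i + 1))) := by
  rw [bCand_eq_fold, bFoldEq]
  have hlen : (PySem.List.pyRange 0 (L - 2) 1).length = (L - 2).toNat := by
    rw [PySem.List.length_pyRange_one]; congr 1; ring
  rw [hlen]
  simp

-- bridge: core's decimal printer against Nat.digits
theorem toDigits_eq_digits (n : Nat) (hn : 0 < n) :
    Nat.toDigits 10 n = (Nat.digits 10 n).reverse.map Nat.digitChar := by
  induction n using Nat.strong_induction_on with
  | _ n ih =>
    rw [Nat.toDigits_eq_if (by norm_num), Nat.digits_def' (by norm_num : (1:Nat) < 10) hn]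
    split_ifs with h
    · simp [Nat.div_eq_of_lt h, Nat.mod_eq_of_lt h]
    · have h10 : 10 ≤ n := le_of_not_gt h
      have hq : 0 < n / 10 := Nat.div_pos h10 (by norm_num)
      rw [ih (n / 10) (Nat.div_lt_self hn (by norm_num)) hq]
      simp

theorem bvI_reverse_digits (l : List Nat) :
    bvI (l.reverse.map Int.ofNat) = ((Nat.ofDigits 10 l : Nat) : Int) := by
  induction l with
  | nil => simp [bvI, Nat.ofDigits_nil]
  | cons d t ih =>
    rw [List.reverse_cons, List.map_append, bvI_append, ih]
    have hone : bvI (List.map Int.ofNat [d]) = (d : Int) := by simp [bvI]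
    rw [hone]
    simp only [Nat.ofDigits_cons, List.length_map, List.length_cons, List.length_nil]
    push_cast
    ring

-- single-character int() on digit characters
theorem pyIntOfChar_digitChar (d : Nat) (hd : d < 10) :
    pyIntOfChar (Nat.digitChar d) = (d : Int) := by
  interval_cases d <;> decide

theorem pyIntOfChar_ofNat (e : Int) (h0 : 0 ≤ e) (h1 : e < 10) :
    pyIntOfChar (Char.ofNat (e + 48).toNat) = e := by
  interval_cases e <;> decide

-- small-value roundtrip int(str(N)) = N for 0 ≤ N < 100
theorem ofChars_toChars_small : ∀ m : Fin 100,
    PySem.Int.ofChars? (PySem.Int.toChars (m : Int)) = some (m : Int) := by decide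

-- bDigLen computes the decimal length
theorem bDigLen_eq (N : Int) (xd : Nat) (hx : 3 ≤ xd)
    (hlo : (10:Int) ^ (xd - 1) ≤ N) (hhi : N < 10 ^ xd) :
    bDigLen N 2 100 (by omega) = (xd : Int) := by
  have key : ∀ (c j : Nat), 2 ≤ j → j ≤ xd → xd - j ≤ c → ∀ hp,
      bDigLen N (j : Int) ((10:Int) ^ j) hp = (xd : Int) := by
    intro c
    induction c with
    | zero =>
      intro j h2 hjx hc hp
      have hj : j = xd := by omega
      subst hj
      rw [bDigLen]
      split_ifs with h
      · exact absurd h (not_le.mpr hhi)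
      · rfl
    | succ c ihc =>
      intro j h2 hjx hc hp
      rw [bDigLen]
      split_ifs with h
      · have hjlt : j < xd := by
          by_contra hcon
          have hj : j = xd := by omega
          subst hj
          exact absurd h (not_le.mpr hhi)
        have h1 := ihc (j + 1) (by omega) (by omega) (by omega) (by positivity)
        convert h1 using 2 <;> push_cast <;> ring
      · push_neg at h
        have hmono : (10:Int) ^ (xd - 1) < 10 ^ j := lt_of_le_of_lt hlo h
        have hj1 : xd - 1 < j := by
          by_contra hcon
          push_neg at hcon
          exact absurd (pow_le_pow_right₀ (by norm_num : (1:Int) ≤ 10) hcon) (not_le.mpr hmono)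
        have : j = xd := by omega
        rw [this]
  have h100 : (100 : Int) = 10 ^ 2 := by norm_num
  have := key (xd - 2) 2 (le_refl _) (by omega) (by omega) (by norm_num)
  simpa [h100] using this



-- B's two inner loops as a sum of per-f counts
theorem twoFold_count (N L cnt : Int) :
    (PySem.List.pyRange 1 10 1).foldl (fun cnt f =>
        (PySem.List.pyRange 0 10 1).foldl (fun cnt g =>
          if bCand L f g ≤ N then cnt + 1 else cnt) cnt) cnt
      = cnt + ((PySem.List.pyRange 1 10 1).map (fun f =>
          (((PySem.List.pyRange 0 10 1).countP (fun g => decide (bCand L f g ≤ N)) : Nat) : Int))).sum := by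
  have hinner : ∀ (c f : Int),
      (PySem.List.pyRange 0 10 1).foldl (fun cnt g => if bCand L f g ≤ N then cnt + 1 else cnt) c
        = c + (((PySem.List.pyRange 0 10 1).countP (fun g => decide (bCand L f g ≤ N)) : Nat) : Int) :=
    fun c f => PySem.List.foldl_ite_add_one _ _ _
  rw [PySem.List.foldl_congr_mem _ _
      (fun c f => c + (((PySem.List.pyRange 0 10 1).countP (fun g => decide (bCand L f g ≤ N)) : Nat) : Int)) cnt
      (fun c f _ => hinner c f)]
  exact PySem.List.foldl_add _ _ _

-- when every candidate of this length is ≤ N the two inner loops count 90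
theorem sum_all (N L : Int)
    (h : ∀ f g : Int, 1 ≤ f → f < 10 → 0 ≤ g → g < 10 → bCand L f g ≤ N) :
    ((PySem.List.pyRange 1 10 1).map (fun f =>
        (((PySem.List.pyRange 0 10 1).countP (fun g => decide (bCand L f g ≤ N)) : Nat) : Int))).sum = 90 := by
  rw [List.map_congr_left (g := fun _ => (10 : Int)) ?_]
  · rw [PySem.List.sum_map_const_int, PySem.List.length_pyRange_one]
    norm_num
  · intro f hf
    obtain ⟨hf1, hf2⟩ := PySem.List.mem_pyRange_one.mp hf
    have hcount : (PySem.List.pyRange 0 10 1).countP (fun g => decide (bCand L f g ≤ N))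
        = (PySem.List.pyRange 0 10 1).length := by
      rw [List.countP_eq_length]
      intro g hg
      obtain ⟨hg1, hg2⟩ := PySem.List.mem_pyRange_one.mp hg
      exact decide_eq_true (h f g hf1 hf2 hg1 hg2)
    rw [hcount, PySem.List.length_pyRange_one]
    norm_num

-- at the top length the loops count the pairs strictly below the leading pair, plus the tie
set_option maxHeartbeats 4000000 in
theorem sum_top (N L K : Int) (Q : Bool) (hK1 : 10 ≤ K) (hK2 : K ≤ 99)
    (h : ∀ f g : Int, 1 ≤ f → f < 10 → 0 ≤ g → g < 10 →
      (bCand L f g ≤ N ↔ (10 * f + g < K ∨ (10 * f + g = K ∧ Q = true)))) :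
    ((PySem.List.pyRange 1 10 1).map (fun f =>
        (((PySem.List.pyRange 0 10 1).countP (fun g => decide (bCand L f g ≤ N)) : Nat) : Int))).sum
      = (K - 10) + (if Q then 1 else 0) := by
  rw [List.map_congr_left (g := fun f =>
      (((PySem.List.pyRange 0 10 1).countP
        (fun g => decide (10 * f + g < K ∨ (10 * f + g = K ∧ Q = true))) : Nat) : Int)) ?_]
  · cases Q with
    | false => interval_cases K <;> decide
    | true => interval_cases K <;> decide
  · intro f hf
    obtain ⟨hf1, hf2⟩ := PySem.List.mem_pyRange_one.mp hf
    congr 1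
    apply List.countP_congr
    intro g hg
    obtain ⟨hg1, hg2⟩ := PySem.List.mem_pyRange_one.mp hg
    simp only [decide_eq_true_eq]
    exact h f g hf1 hf2 hg1 hg2

-- the decisive comparison: a length-x candidate is ≤ N iff its leading pair is lexicographically
-- below N's, or equal with the generated digit list ≤ N's digit list
theorem cand_iff (N d0 d1 : Int) (t : Nat) (rest : List Int)
    (hrl : rest.length = t) (hd0 : 1 ≤ d0 ∧ d0 < 10) (hd1 : 0 ≤ d1 ∧ d1 < 10)
    (hrest : ∀ e ∈ rest, 0 ≤ e ∧ e < 10)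
    (hN : N = bvI (d0 :: d1 :: rest))
    (f g : Int) (hf1 : 1 ≤ f) (hf2 : f < 10) (hg1 : 0 ≤ g) (hg2 : g < 10) :
    (bCand ((t : Int) + 2) f g ≤ N ↔
      (10 * f + g < 10 * d0 + d1 ∨ (10 * f + g = 10 * d0 + d1 ∧
        pyListLe (d0 :: d1 :: (List.range t).map (fun i => dseq d0 d1 (i + 1))) (d0 :: d1 :: rest)
          = true))) := by
  have htp : (0:Int) < 10 ^ t := by positivity
  have htt : (((t : Int) + 2) - 2).toNat = t := by omega
  have hb := bCand_bound ((t : Int) + 2) f g hg1 hg2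
  rw [htt] at hb
  have hrb := bvI_bounds rest hrest
  rw [hrl] at hrb
  have hNval : N = (10 * d0 + d1) * 10 ^ t + bvI rest := by
    rw [hN, bvI_cons, bvI_cons]
    simp only [List.length_cons, hrl]
    ring
  rcases lt_trichotomy (10 * f + g) (10 * d0 + d1) with hlt | heq | hgt
  · have hle : bCand ((t : Int) + 2) f g ≤ N := by nlinarith [hb.2, hrb.1]
    simp [hle, hlt]
  · have hfd : f = d0 := by omega
    have hgd : g = d1 := by omega
    subst hfd; subst hgd
    have hext := bCand_exact ((t : Int) + 2) f g
    rw [htt] at hext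
    set ext := (List.range t).map (fun i => dseq f g (i + 1)) with hextdef
    have hextlen : ext.length = t := by rw [hextdef]; simp
    have hextb : ∀ e ∈ ext, 0 ≤ e ∧ e < 10 := by
      intro e he
      rw [hextdef] at he
      obtain ⟨i, _, hi⟩ := List.mem_map.mp he
      exact hi ▸ dseq_bounds f g ⟨hg1, hg2⟩ (i + 1)
    have hcv : bCand ((t : Int) + 2) f g = bvI (f :: g :: ext) := by
      rw [hext, bvI_cons, bvI_cons]
      simp only [List.length_cons, hextlen]
      ring
    have hlex := pyListLe_iff (f :: g :: ext) (f :: g :: rest)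
      (by simp [hextlen, hrl])
      (by intro e he
          rcases List.mem_cons.mp he with h1 | he
          · exact h1 ▸ ⟨by omega, by omega⟩
          rcases List.mem_cons.mp he with h1 | he
          · exact h1 ▸ ⟨hg1, hg2⟩
          · exact hextb e he)
      (by intro e he
          rcases List.mem_cons.mp he with h1 | he
          · exact h1 ▸ ⟨by omega, by omega⟩
          rcases List.mem_cons.mp he with h1 | he
          · exact h1 ▸ ⟨hg1, hg2⟩
          · exact hrest e he)
    rw [hcv, hN, heq]
    simp only [lt_irrefl, false_or, true_and]
    exact hlex.symm
  · have hgt' : ¬ bCand ((t : Int) + 2) f g ≤ N := by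
      push_neg
      nlinarith [hb.1, hrb.2]
    simp [hgt']
    omega


theorem pyGet_one {α : Type} (a b : α) (l : List α) : PySem.List.pyGet? (a :: b :: l) 1 = some b := by
  have h := PySem.List.pyGet?_cons_succ (x := a) (xs := b :: l) (n := 0)
  rw [show ((0:Nat):Int) + 1 = 1 by norm_num] at h
  rw [h, PySem.List.pyGet?_natCast]
  rfl

theorem count_special_numbers_spec : Claim_equal_count_special_numbers := by
  intro N _ hPre
  have hN0 : 0 ≤ N := hPre
  unfold Spec_count_special_numbers
  by_cases hsmall : N < 100
  · -- small branch: both sides return N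
    have hnn : ¬ N < 0 := by omega
    have hchars : PySem.Int.toChars N = Nat.toDigits 10 N.toNat := by
      simp [PySem.Int.toChars, hnn]
    have hlen : (PySem.Int.toChars N).length ≤ 2 := by
      rw [hchars]
      exact (Nat.length_toDigits_le_iff (by norm_num) (by norm_num)).mpr (by omega)
    have hr := ofChars_toChars_small ⟨N.toNat, by omega⟩
    have hcast : (((⟨N.toNat, by omega⟩ : Fin 100) : Nat) : Int) = N := by
      simp [Int.toNat_of_nonneg hN0]
    simp only [count_special_numbers, count_special_numbers_alt]
    rw [if_neg (show ¬ 2 < (PySem.Int.toChars N).length by omega), if_pos hsmall]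
    rw [show ((⟨N.toNat, by omega⟩ : Fin 100) : Int) = N from hcast] at hr
    rw [hr]
    rfl
  · -- big branch
    push_neg at hsmall
    have hm100 : 100 ≤ N.toNat := by omega
    have hmN : (N.toNat : Int) = N := Int.toNat_of_nonneg hN0
    have hnn : ¬ N < 0 := by omega
    have hchars : PySem.Int.toChars N = (Nat.digits 10 N.toNat).reverse.map Nat.digitChar := by
      simp only [PySem.Int.toChars, hnn, if_false]
      exact toDigits_eq_digits N.toNat (by omega)
    set ds := (Nat.digits 10 N.toNat).reverse with hdsdef
    set xd := ds.length with hxddef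
    have hlen3 : 3 ≤ xd := by
      have h1 : ¬ (Nat.toDigits 10 N.toNat).length ≤ 2 := by
        rw [Nat.length_toDigits_le_iff (by norm_num) (by norm_num)]
        omega
      have h2 : (Nat.toDigits 10 N.toNat).length = xd := by
        rw [toDigits_eq_digits N.toNat (by omega), hxddef, hdsdef, List.length_map]
      omega
    have hdig : ∀ d ∈ ds, d < 10 := by
      intro d hd
      exact Nat.digits_lt_base (by norm_num) (List.mem_reverse.mp hd)
    obtain ⟨d0, d1, rest, hds3⟩ : ∃ d0 d1 rest, ds = d0 :: d1 :: rest := by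
      have h0 : ds ≠ [] := by
        intro h
        rw [hxddef, h] at hlen3
        simp at hlen3
      obtain ⟨d0, tl, h1⟩ := List.exists_cons_of_ne_nil h0
      have h0' : tl ≠ [] := by
        intro h
        rw [hxddef, h1, h] at hlen3
        simp at hlen3
      obtain ⟨d1, rest, h2⟩ := List.exists_cons_of_ne_nil h0'
      exact ⟨d0, d1, rest, by rw [h1, h2]⟩
    have hrestlen : rest.length = xd - 2 := by
      rw [hxddef, hds3]
      simp
    have hd0ne : d0 ≠ 0 := by
      have hne : Nat.digits 10 N.toNat ≠ [] := Nat.digits_ne_nil_iff_ne_zero.mpr (by omega)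
      have h1 : (Nat.digits 10 N.toNat).getLast hne ≠ 0 := Nat.getLast_digit_ne_zero 10 (by omega)
      have h2 : (Nat.digits 10 N.toNat).getLast? = some ((Nat.digits 10 N.toNat).getLast hne) :=
        List.getLast?_eq_some_getLast hne
      have h3 : ds.head? = (Nat.digits 10 N.toNat).getLast? := by
        rw [hdsdef]
        exact List.head?_reverse
      rw [hds3, h2] at h3
      simp at h3
      omega
    have hd00 : d0 < 10 := hdig d0 (by rw [hds3]; exact List.mem_cons_self ..)
    have hd10 : d1 < 10 := hdig d1 (by rw [hds3]; exact List.mem_cons_of_mem _ (List.mem_cons_self ..))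
    have hd0b : 1 ≤ (d0 : Int) ∧ (d0 : Int) < 10 := by constructor <;> [exact_mod_cast Nat.one_le_iff_ne_zero.mpr hd0ne; exact_mod_cast hd00]
    have hd1b : 0 ≤ (d1 : Int) ∧ (d1 : Int) < 10 := ⟨Int.natCast_nonneg d1, by exact_mod_cast hd10⟩
    have hrestb : ∀ e ∈ rest.map Int.ofNat, 0 ≤ e ∧ e < 10 := by
      intro e he
      obtain ⟨d, hd, rfl⟩ := List.mem_map.mp he
      have : d < 10 := hdig d (by rw [hds3]; exact List.mem_cons_of_mem _ (List.mem_cons_of_mem _ hd))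
      refine ⟨?_, ?_⟩ <;> rw [Int.ofNat_eq_natCast]
      · exact Int.natCast_nonneg d
      · exact_mod_cast this
    have hdigI : ∀ e ∈ ds.map Int.ofNat, 0 ≤ e ∧ e < 10 := by
      intro e he
      obtain ⟨d, hd, rfl⟩ := List.mem_map.mp he
      refine ⟨?_, ?_⟩ <;> rw [Int.ofNat_eq_natCast]
      · exact Int.natCast_nonneg d
      · exact_mod_cast hdig d hd
    have hval : bvI (ds.map Int.ofNat) = N := by
      rw [hdsdef, bvI_reverse_digits, Nat.ofDigits_digits, hmN]
    have hvalN : N = bvI ((d0 : Int) :: (d1 : Int) :: rest.map Int.ofNat) := by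
      rw [← hval, hds3]
      simp [List.map_cons]
    have hub : N < 10 ^ xd := by
      have h := (bvI_bounds (ds.map Int.ofNat) hdigI).2
      rw [hval, List.length_map, ← hxddef] at h
      exact h
    have hlb : (10 : Int) ^ (xd - 1) ≤ N := by
      have hlen2 : ((d1 : Int) :: rest.map Int.ofNat).length = xd - 1 := by
        simp [hrestlen]
        omega
      have h2 := bvI_bounds ((d1 : Int) :: rest.map Int.ofNat)
        (by intro e he
            rcases List.mem_cons.mp he with h1 | he
            · exact h1 ▸ hd1b
            · exact hrestb e he)
      rw [hlen2] at h2
      rw [hvalN, bvI_cons, hlen2]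
      nlinarith [h2.1, pow_pos (show (0:Int) < 10 by norm_num) (xd - 1), hd0b.1]
    have hmod0 : PySem.Int.mod (d0 : Int) 10 = (d0 : Int) := by
      rw [PySem.Int.mod_eq_emod_of_pos (by norm_num)]
      exact Int.emod_eq_of_lt (Int.natCast_nonneg d0) hd0b.2
    have hmod1 : PySem.Int.mod (d1 : Int) 10 = (d1 : Int) := by
      rw [PySem.Int.mod_eq_emod_of_pos (by norm_num)]
      exact Int.emod_eq_of_lt hd1b.1 hd1b.2
    -- ===== A side =====
    simp only [count_special_numbers]
    rw [hchars, hds3]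
    simp only [List.map_cons, List.length_cons, List.length_map]
    rw [if_pos (show 2 < rest.length + 1 + 1 by omega)]
    rw [PySem.List.pyGet?_zero_cons, pyGet_one]
    simp only [Option.getD_some]
    rw [pyIntOfChar_digitChar d0 hd00, pyIntOfChar_digitChar d1 hd10, hmod0, hmod1]
    -- the 90-per-length loop of A
    rw [PySem.List.foldl_add _ (fun _ => (90 : Int)), PySem.List.sum_map_const_int,
        PySem.List.length_pyRange_one]
    -- the filling loop of A
    have hfill := aFold (d0 : Int) (d1 : Int)
      (PySem.List.pyRange 2 ((rest.length + 1 + 1 : Nat) : Int) 1) 0 []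
    rw [show dseq (d0 : Int) (d1 : Int) 0 = (d1 : Int) from rfl,
        PySem.List.length_pyRange_one] at hfill
    have htn : (((rest.length + 1 + 1 : Nat) : Int) - 2).toNat = xd - 2 := by
      omega
    rw [htn] at hfill
    rw [hfill]
    simp only [List.nil_append, List.map_map]
    have hextmap : (List.range (xd - 2)).map
        (pyIntOfChar ∘ fun i => Char.ofNat (dseq (d0 : Int) (d1 : Int) (0 + i + 1) + 48).toNat)
        = (List.range (xd - 2)).map (fun i => dseq (d0 : Int) (d1 : Int) (i + 1)) := by
      apply List.map_congr_left
      intro i _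
      simp only [Function.comp_apply]
      rw [show 0 + i + 1 = i + 1 by omega]
      exact pyIntOfChar_ofNat _ (dseq_bounds _ _ hd1b (i + 1)).1 (dseq_bounds _ _ hd1b (i + 1)).2
    rw [hextmap]
    have hnomap : rest.map (pyIntOfChar ∘ Nat.digitChar) = rest.map Int.ofNat := by
      apply List.map_congr_left
      intro d hd
      simp only [Function.comp_apply]
      rw [pyIntOfChar_digitChar d
        (hdig d (by rw [hds3]; exact List.mem_cons_of_mem _ (List.mem_cons_of_mem _ hd)))]
      rfl
    rw [hnomap]
    -- ===== B side =====
    simp only [count_special_numbers_alt]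
    rw [if_neg (show ¬ N < 100 by omega)]
    rw [bDigLen_eq N xd hlen3 hlb hub]
    rw [PySem.List.pyRange_one_succ_right (show (3:Int) ≤ (xd : Int) by exact_mod_cast hlen3)]
    rw [List.foldl_append]
    rw [PySem.List.foldl_congr_mem (PySem.List.pyRange 3 ((xd : Int)) 1) _
        (fun c _ => c + 90) 99 ?hb90]
    case hb90 =>
      intro c L hL
      obtain ⟨hL3, hLx⟩ := PySem.List.mem_pyRange_one.mp hL
      rw [twoFold_count, sum_all]
      intro f g hf1 hf2 hg1 hg2
      have hb := (bCand_bound L f g hg1 hg2).2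
      have htL : ((L - 2).toNat : Int) = L - 2 := Int.toNat_of_nonneg (by omega)
      have hmono : (10 : Int) ^ ((L - 2).toNat + 2) ≤ 10 ^ (xd - 1) := by
        apply pow_le_pow_right₀ (by norm_num)
        omega
      have h100 : (10 : Int) ^ ((L - 2).toNat + 2) = 100 * 10 ^ (L - 2).toNat := by
        rw [pow_add]
        ring
      have hple : (f * 10 + g + 1) * 10 ^ (L - 2).toNat ≤ 100 * 10 ^ (L - 2).toNat := by
        have : (0:Int) < 10 ^ (L - 2).toNat := by positivity
        nlinarith
      nlinarith [hlb]
    rw [PySem.List.foldl_add _ (fun _ => (90 : Int)), PySem.List.sum_map_const_int,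
        PySem.List.length_pyRange_one]
    rw [List.foldl_cons, List.foldl_nil]
    rw [twoFold_count]
    rw [sum_top N ((xd : Int)) (10 * (d0 : Int) + (d1 : Int))
        (pyListLe ((d0 : Int) :: (d1 : Int) :: (List.range (xd - 2)).map
            (fun i => dseq (d0 : Int) (d1 : Int) (i + 1)))
          ((d0 : Int) :: (d1 : Int) :: rest.map Int.ofNat))
        (by omega) (by omega) ?hiff]
    case hiff =>
      intro f g hf1 hf2 hg1 hg2
      have hxt : (((xd - 2 : Nat) : Int)) + 2 = (xd : Int) := by
        omega
      have h := cand_iff N (d0 : Int) (d1 : Int) (xd - 2) (rest.map Int.ofNat)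
        (by rw [List.length_map]; exact hrestlen) hd0b hd1b hrestb hvalN f g hf1 hf2 hg1 hg2
      rw [hxt] at h
      exact h
    -- final arithmetic
    have hA3 : ((((rest.length + 1 + 1 : Nat) : Int) - 3).toNat : Int) = (xd : Int) - 3 := by
      omega
    have hB3 : ((((xd : Int)) - 3).toNat : Int) = (xd : Int) - 3 := by
      omega
    rw [hA3, hB3]
    cases hQ : pyListLe ((d0 : Int) :: (d1 : Int) :: (List.range (xd - 2)).map
        (fun i => dseq (d0 : Int) (d1 : Int) (i + 1)))
      ((d0 : Int) :: (d1 : Int) :: rest.map Int.ofNat) with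
    | false => simp only [if_false, Bool.false_eq_true]; ring
    | true => simp only [if_true]; ring
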